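-- pv_equiv track=rewrite | github.com/ParasharaRamesh/DSA-Prep | algorithms/Strongly Connected Components in directed graph.py | get_finish_order_dfs
-- ===== SOURCE A (Python) =====
-- def get_finish_order_dfs(adj):
--     # lets just assume that we start dfs from node #0
--     visited = set()
--     finishing_node_stack = []
--
--     # function to go through stuff
--     def dfs(node):
--         if node not in visited:
--             visited.add(node)
--
--             for neighbor in adj[node]:
--                 dfs(neighbor)
--
--             finishing_node_stack.append(node)
--
--     # do dfs across all nodes
--     for node in adj.keys():
--         dfs(node)
--
--     # return the finishing order
--     return finishing_node_stack
-- ===== SOURCE B (Python) =====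
-- def get_finish_order_dfs(adj):
--     # Iterative DFS with an explicit stack of (node, is_exit) frames,
--     # producing the same post-order finishing sequence as the recursion.
--     visited = set()
--     finishing_order = []
--     stack = [(node, False) for node in reversed(list(adj.keys()))]
--     while stack:
--         node, is_exit = stack.pop()
--         if is_exit:
--             finishing_order.append(node)
--         elif node not in visited:
--             visited.add(node)
--             stack.append((node, True))
--             for neighbor in reversed(adj[node]):
--                 stack.append((neighbor, False))
--     return finishing_order
-- ===== Notes on version B (the rewrite author's own statement) =====
-- stated objective: alternative
-- what changed: The recursive DFS (nested closure, one recursion per node) is replaced by an iterative DFS over a single explicit stack of (node, is_exit) frames, with visited checked at pop time and neighbors pushed in reverse, producing the identical finishing order without recursion.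
import Mathlib
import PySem

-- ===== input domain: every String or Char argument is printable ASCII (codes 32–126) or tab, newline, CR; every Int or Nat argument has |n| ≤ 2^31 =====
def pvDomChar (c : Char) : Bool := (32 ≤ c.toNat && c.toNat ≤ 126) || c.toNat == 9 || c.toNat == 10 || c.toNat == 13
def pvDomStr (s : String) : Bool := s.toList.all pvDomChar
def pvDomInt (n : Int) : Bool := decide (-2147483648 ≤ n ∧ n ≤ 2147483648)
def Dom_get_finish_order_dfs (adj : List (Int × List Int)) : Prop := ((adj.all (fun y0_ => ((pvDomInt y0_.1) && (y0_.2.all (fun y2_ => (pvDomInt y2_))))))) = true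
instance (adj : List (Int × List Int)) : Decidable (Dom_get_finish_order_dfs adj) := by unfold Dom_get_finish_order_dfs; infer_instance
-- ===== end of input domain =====

-- B replaces A's recursive DFS by an iterative DFS on an explicit stack of
-- (node, is_exit) frames; same finishing order, no recursion (objective: alternative).

-- ===== PORT A =====
-- Transliteration of the recursive `dfs`: the fuel is a totality device only;
-- `pvFuelA adj` never runs out, since every nested call enters a fresh node.
-- Python's `adj[node]` raises KeyError on a missing key; here `getD _ []`
-- returns [] there — exactly the inputs Pre_ excludes.
def pvDfsA (d : PySem.Dict Int (List Int)) : Nat → Int → PySem.Set Int × List Int → PySem.Set Int × List Int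
  | 0, _, st => st
  | f+1, node, st =>
      if PySem.Set.contains st.1 node then st
      else
        let st1 : PySem.Set Int × List Int := (PySem.Set.add st.1 node, st.2)
        let st2 := (d.getD node []).foldl (fun s nb => pvDfsA d f nb s) st1
        (st2.1, st2.2 ++ [node])

def pvD (adj : List (Int × List Int)) : Nat := (adj.map (fun p => p.2.length)).sum
def pvFuelA (adj : List (Int × List Int)) : Nat := adj.length + pvD adj + 1

def get_finish_order_dfs (adj : List (Int × List Int)) : List Int :=
  let d := PySem.Dict.mk adj
  (d.keys.foldl (fun st node => pvDfsA d (pvFuelA adj) node st) (PySem.Set.empty, [])).2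

-- ===== PORT B =====
-- Transliteration of Source B's stack machine.  The head of the Lean list is the
-- TOP of the Python stack (Python appends/pops at the end), so pushing the
-- REVERSED neighbor list one element at a time leaves the neighbors on top in
-- their original order: `nbrs.map enter ++ stack`.  Fuel is a totality device;
-- `pvFuelB adj` bounds the number of loop iterations of any run.
def pvRunB (d : PySem.Dict Int (List Int)) : Nat → List (Int × Bool) → PySem.Set Int × List Int → PySem.Set Int × List Int
  | 0, _, st => st
  | _+1, [], st => st
  | f+1, (node, isExit) :: rest, st =>
      if isExit then pvRunB d f rest (st.1, st.2 ++ [node])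
      else if PySem.Set.contains st.1 node then pvRunB d f rest st
      else pvRunB d f ((d.getD node []).map (fun nb => (nb, false)) ++ (node, true) :: rest)
             (PySem.Set.add st.1 node, st.2)

def pvFuelB (adj : List (Int × List Int)) : Nat :=
  adj.length + (adj.length + pvD adj) * (pvD adj + 2) + 1

-- initial stack: `[(node, False) for node in reversed(list(adj.keys()))]`,
-- top = first key, i.e. head-first it is the keys in original order
def get_finish_order_dfs_alt (adj : List (Int × List Int)) : List Int :=
  let d := PySem.Dict.mk adj
  (pvRunB d (pvFuelB adj) (d.keys.map (fun k => (k, false))) (PySem.Set.empty, [])).2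

-- ===== PRECONDITION & SPEC =====
-- Pre_ excludes exactly the inputs on which Python A raises KeyError: some
-- listed neighbor (all of which get visited, every key being a DFS root) is
-- not a key of adj.  Python B raises KeyError on the same inputs.
def Pre_get_finish_order_dfs (adj : List (Int × List Int)) : Prop :=
  ∀ p ∈ adj, ∀ n ∈ p.2, n ∈ adj.map Prod.fst
instance (adj : List (Int × List Int)) : Decidable (Pre_get_finish_order_dfs adj) := by
  unfold Pre_get_finish_order_dfs; infer_instance

def pvWitness_get_finish_order_dfs : (List (Int × List Int)) := [(0, [1, 2]), (1, [0]), (2, [])]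

def Spec_get_finish_order_dfs (adj : List (Int × List Int)) (out : List Int) : Prop := out = get_finish_order_dfs_alt adj
instance (adj : List (Int × List Int)) (out : List Int) : Decidable (Spec_get_finish_order_dfs adj out) := by unfold Spec_get_finish_order_dfs; infer_instance

-- ===== CLAIM (what is proved, stated in full; the proofs are below) =====
def Claim_equal_get_finish_order_dfs : Prop := ∀ (adj : List (Int × List Int)), Dom_get_finish_order_dfs adj → Pre_get_finish_order_dfs adj → Spec_get_finish_order_dfs adj (get_finish_order_dfs adj)

-- ===== LEMMAS AND PROOFS =====

-- all node values occurring in adj (keys and neighbors)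
def pvAll (adj : List (Int × List Int)) : List Int := adj.flatMap (fun p => p.1 :: p.2)

-- number of not-yet-visited node values
def pvU (adj : List (Int × List Int)) (vis : List Int) : Nat :=
  ((pvAll adj).toFinset \ vis.toFinset).card

-- fuel bound for the stack machine from a given configuration
def pvC (adj : List (Int × List Int)) (stack : List (Int × Bool)) (vis : List Int) : Nat :=
  stack.length + pvU adj vis * (pvD adj + 2)

-- every enter frame on the stack carries a node value occurring in adj
def pvOK (adj : List (Int × List Int)) (stack : List (Int × Bool)) : Prop :=
  ∀ fr ∈ stack, fr.2 = false → fr.1 ∈ pvAll adj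

lemma pvGetD_spec (adj : List (Int × List Int)) (n : Int) :
    (PySem.Dict.mk adj).getD n [] = [] ∨ ∃ v, (n, v) ∈ adj ∧ (PySem.Dict.mk adj).getD n [] = v := by
  induction adj with
  | nil => left; simp [PySem.Dict.getD, PySem.Dict.get?]
  | cons p rest ih =>
    obtain ⟨k, v⟩ := p
    rw [PySem.Dict.getD_eq_get?_getD, PySem.Dict.get?_mk_cons]
    by_cases h : k = n
    · subst h; right; exact ⟨v, by simp, by simp⟩
    · simp only [beq_iff_eq, h, if_false]
      rw [← PySem.Dict.getD_eq_get?_getD]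
      rcases ih with h0 | ⟨w, hw, he⟩
      · left; exact h0
      · right; exact ⟨w, by simp [hw], he⟩

lemma pvGetD_sub_all (adj : List (Int × List Int)) (n x : Int)
    (hx : x ∈ (PySem.Dict.mk adj).getD n []) : x ∈ pvAll adj := by
  rcases pvGetD_spec adj n with h | ⟨v, hv, he⟩
  · rw [h] at hx; simp at hx
  · rw [he] at hx
    exact List.mem_flatMap.mpr ⟨(n, v), hv, by simp [hx]⟩

lemma pvGetD_len (adj : List (Int × List Int)) (n : Int) :
    ((PySem.Dict.mk adj).getD n []).length ≤ pvD adj := by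
  rcases pvGetD_spec adj n with h | ⟨v, hv, he⟩
  · simp [h]
  · rw [he]
    exact List.single_le_sum (fun _ _ => Nat.zero_le _) _
      (List.mem_map.mpr ⟨(n, v), hv, rfl⟩)

lemma pvU_mono (adj : List (Int × List Int)) (v v' : List Int)
    (h : ∀ x ∈ v, x ∈ v') : pvU adj v' ≤ pvU adj v := by
  apply Finset.card_le_card
  apply Finset.sdiff_subset_sdiff (Finset.Subset.refl _)
  intro x hx
  simp only [List.mem_toFinset] at *
  exact h x hx

lemma pvU_add (adj : List (Int × List Int)) (v : List Int) (n : Int)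
    (hmem : n ∈ pvAll adj) (hnv : n ∉ v) :
    pvU adj (PySem.Set.add v n) + 1 = pvU adj v := by
  rw [PySem.Set.add_of_not_mem hnv]
  unfold pvU
  have hfin : (v ++ [n]).toFinset = insert n v.toFinset := by
    ext x; simp
  rw [hfin, Finset.sdiff_insert]
  have hmem' : n ∈ (pvAll adj).toFinset \ v.toFinset := by
    simp [List.mem_toFinset, hmem, hnv]
  rw [Finset.card_erase_of_mem hmem']
  have := Finset.card_pos.mpr ⟨n, hmem'⟩
  omega

lemma pvFoldA_mono (d : PySem.Dict Int (List Int)) (f : Nat)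
    (h1 : ∀ n st x, x ∈ st.1 → x ∈ (pvDfsA d f n st).1) :
    ∀ (l : List Int) st x, x ∈ st.1 → x ∈ (l.foldl (fun s nb => pvDfsA d f nb s) st).1 := by
  intro l
  induction l with
  | nil => intro st x hx; simpa using hx
  | cons a l ih =>
    intro st x hx
    simp only [List.foldl_cons]
    exact ih _ x (h1 a st x hx)

lemma pvDfsA_mono (d : PySem.Dict Int (List Int)) :
    ∀ (f : Nat) (n : Int) st (x : Int), x ∈ st.1 → x ∈ (pvDfsA d f n st).1 := by
  intro f
  induction f with
  | zero => intro n st x hx; simpa [pvDfsA] using hx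
  | succ g ih =>
    intro n st x hx
    simp only [pvDfsA]
    split
    · exact hx
    · exact pvFoldA_mono d g ih _ _ x ((PySem.Set.mem_add _ _ _).mpr (Or.inl hx))

lemma pvRunB_nil (d : PySem.Dict Int (List Int)) (f : Nat) (st : PySem.Set Int × List Int) :
    pvRunB d f [] st = st := by cases f <;> simp [pvRunB]


lemma pvDfsA_succ (d : PySem.Dict Int (List Int)) (f : Nat) (node : Int) (st : PySem.Set Int × List Int) :
    pvDfsA d (f+1) node st
      = if PySem.Set.contains st.1 node then st
        else
          (let st2 := (d.getD node []).foldl (fun s nb => pvDfsA d f nb s) (PySem.Set.add st.1 node, st.2)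
           (st2.1, st2.2 ++ [node])) := rfl

lemma pvRunB_succ (d : PySem.Dict Int (List Int)) (f : Nat) (node : Int) (ex : Bool)
    (rest : List (Int × Bool)) (st : PySem.Set Int × List Int) :
    pvRunB d (f+1) ((node, ex) :: rest) st
      = if ex then pvRunB d f rest (st.1, st.2 ++ [node])
        else if PySem.Set.contains st.1 node then pvRunB d f rest st
        else pvRunB d f ((d.getD node []).map (fun nb => (nb, false)) ++ (node, true) :: rest)
               (PySem.Set.add st.1 node, st.2) := rfl

lemma pvNotMem_of_contains_false (s : PySem.Set Int) (n : Int)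
    (h : ¬ PySem.Set.contains s n = true) : n ∉ s := by
  intro hm; exact h ((PySem.Set.contains_iff _ _).mpr hm)

-- the stack machine's result does not depend on the fuel once the fuel is at
-- least pvC of the configuration
lemma pvRunB_stab (adj : List (Int × List Int)) :
    ∀ (fB : Nat) (stack : List (Int × Bool)) (st : PySem.Set Int × List Int) (fB' : Nat),
      pvOK adj stack →
      pvC adj stack st.1 ≤ fB → pvC adj stack st.1 ≤ fB' →
      pvRunB (PySem.Dict.mk adj) fB stack st = pvRunB (PySem.Dict.mk adj) fB' stack st := by
  intro fB
  induction fB using Nat.strong_induction_on with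
  | _ fB IH =>
    intro stack st fB' hok hc hc'
    match stack with
    | [] => rw [pvRunB_nil, pvRunB_nil]
    | (node, isExit) :: rest =>
      have hlen : 1 ≤ pvC adj ((node, isExit) :: rest) st.1 := by
        unfold pvC; simp; omega
      obtain ⟨a, rfl⟩ : ∃ a, fB = a + 1 := ⟨fB - 1, by omega⟩
      obtain ⟨b, rfl⟩ : ∃ b, fB' = b + 1 := ⟨fB' - 1, by omega⟩
      have hokr : pvOK adj rest := fun fr hfr => hok fr (List.mem_cons_of_mem _ hfr)
      by_cases hex : isExit
      · subst hex
        simp only [pvRunB]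
        have hcr : pvC adj rest st.1 ≤ a ∧ pvC adj rest st.1 ≤ b := by
          unfold pvC at *; simp at hc hc' ⊢; omega
        exact IH a (by omega) rest _ b hokr hcr.1 hcr.2
      · have hex' : isExit = false := by simpa using hex
        subst hex'
        simp only [pvRunB]
        by_cases hv : PySem.Set.contains st.1 node
        · simp only [hv, if_true, if_false, Bool.false_eq_true]
          have hcr : pvC adj rest st.1 ≤ a ∧ pvC adj rest st.1 ≤ b := by
            unfold pvC at *; simp at hc hc' ⊢; omega
          exact IH a (by omega) rest _ b hokr hcr.1 hcr.2
        · simp only [hv, if_false, Bool.false_eq_true]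
          have hnv : node ∉ st.1 := pvNotMem_of_contains_false _ _ hv
          have hall : node ∈ pvAll adj := hok (node, false) (by simp) rfl
          have hU := pvU_add adj st.1 node hall hnv
          have hdeg := pvGetD_len adj node
          have hok2 : pvOK adj (((PySem.Dict.mk adj).getD node []).map (fun nb => (nb, false)) ++ (node, true) :: rest) := by
            intro fr hfr hfr2
            rcases List.mem_append.mp hfr with h | h
            · obtain ⟨nb, hnb, rfl⟩ := List.mem_map.mp h
              exact pvGetD_sub_all adj node nb hnb
            · rcases List.mem_cons.mp h with h | h
              · subst h; simp at hfr2
              · exact hok fr (List.mem_cons_of_mem _ h) hfr2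
          have hc2 : pvC adj (((PySem.Dict.mk adj).getD node []).map (fun nb => (nb, false)) ++ (node, true) :: rest) (PySem.Set.add st.1 node) + 1
              ≤ pvC adj ((node, false) :: rest) st.1 := by
            have hmul : pvU adj st.1 * (pvD adj + 2)
                = pvU adj (PySem.Set.add st.1 node) * (pvD adj + 2) + (pvD adj + 2) := by
              rw [← hU]; ring
            unfold pvC
            simp only [List.length_append, List.length_map, List.length_cons]
            omega
          have hc2' : pvC adj (((PySem.Dict.mk adj).getD node []).map (fun nb => (nb, false)) ++ (node, true) :: rest) (PySem.Set.add st.1 node, st.2).1 + 1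
              ≤ pvC adj ((node, false) :: rest) st.1 := hc2
          exact IH a (by omega) _ _ b hok2 (by omega) (by omega)

-- main simulation: processing a block of enter frames equals first running A's
-- recursive dfs over those nodes, for any sufficient fuels
lemma pvSIM (adj : List (Int × List Int)) :
    ∀ (f : Nat) (rest : List (Int × Bool)), pvOK adj rest →
      ∀ (nodes : List Int) (st : PySem.Set Int × List Int) (fB fB' : Nat),
        (∀ n ∈ nodes, n ∈ pvAll adj) →
        pvU adj st.1 + 1 ≤ f →
        pvC adj (nodes.map (fun n => (n, false)) ++ rest) st.1 ≤ fB →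
        pvC adj rest (nodes.foldl (fun s n => pvDfsA (PySem.Dict.mk adj) f n s) st).1 ≤ fB' →
        pvRunB (PySem.Dict.mk adj) fB (nodes.map (fun n => (n, false)) ++ rest) st
          = pvRunB (PySem.Dict.mk adj) fB' rest (nodes.foldl (fun s n => pvDfsA (PySem.Dict.mk adj) f n s) st) := by
  intro f
  induction f with
  | zero => intro rest _ nodes st fB fB' _ hf _ _; omega
  | succ g IHf =>
    intro rest hokr nodes
    induction nodes with
    | nil =>
      intro st fB fB' _ _ hcB hcB'
      simp only [List.map_nil, List.nil_append, List.foldl_nil] at *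
      exact pvRunB_stab adj fB rest st fB' hokr hcB hcB'
    | cons n ns IHns =>
      intro st fB fB' hmem hf hcB hcB'
      have hn : n ∈ pvAll adj := hmem n (by simp)
      obtain ⟨a, rfl⟩ : ∃ a, fB = a + 1 := by
        refine ⟨fB - 1, ?_⟩
        have : 1 ≤ pvC adj ((n :: ns).map (fun n => (n, false)) ++ rest) st.1 := by
          unfold pvC; simp; omega
        omega
      simp only [List.map_cons, List.cons_append, List.foldl_cons] at hcB' ⊢
      by_cases hv : PySem.Set.contains st.1 n
      · have hA : pvDfsA (PySem.Dict.mk adj) (g+1) n st = st := by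
          rw [pvDfsA_succ, if_pos hv]
        rw [hA]
        rw [show pvRunB (PySem.Dict.mk adj) (a+1) ((n, false) :: (ns.map (fun n => (n, false)) ++ rest)) st
              = pvRunB (PySem.Dict.mk adj) a (ns.map (fun n => (n, false)) ++ rest) st by
            rw [pvRunB_succ, if_neg (by simp), if_pos hv]]
        apply IHns st a fB' (fun m hm => hmem m (by simp [hm])) hf
        · unfold pvC at hcB ⊢; simp at hcB ⊢; omega
        · rw [hA] at hcB'; exact hcB'
      · have hnv : n ∉ st.1 := pvNotMem_of_contains_false _ _ hv
        have hU := pvU_add adj st.1 n hn hnv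
        have hdeg := pvGetD_len adj n
        set nbrs := (PySem.Dict.mk adj).getD n [] with hnbrs
        have hA : pvDfsA (PySem.Dict.mk adj) (g+1) n st
            = (let st2 := nbrs.foldl (fun s nb => pvDfsA (PySem.Dict.mk adj) g nb s) (PySem.Set.add st.1 n, st.2)
               (st2.1, st2.2 ++ [n])) := by
          rw [pvDfsA_succ, if_neg hv]
        set st2 := nbrs.foldl (fun s nb => pvDfsA (PySem.Dict.mk adj) g nb s) (PySem.Set.add st.1 n, st.2) with hst2
        have hstep : pvRunB (PySem.Dict.mk adj) (a+1) ((n, false) :: (ns.map (fun n => (n, false)) ++ rest)) st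
            = pvRunB (PySem.Dict.mk adj) a (nbrs.map (fun nb => (nb, false)) ++ (n, true) :: (ns.map (fun n => (n, false)) ++ rest)) (PySem.Set.add st.1 n, st.2) := by
          rw [pvRunB_succ, if_neg (by simp), if_neg hv]
        rw [hstep]
        have hokr2 : pvOK adj ((n, true) :: (ns.map (fun n => (n, false)) ++ rest)) := by
          intro fr hfr hfr2
          rcases List.mem_cons.mp hfr with h | h
          · subst h; simp at hfr2
          · rcases List.mem_append.mp h with h | h
            · obtain ⟨m, hm, rfl⟩ := List.mem_map.mp h
              exact hmem m (by simp [hm])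
            · exact hokr fr h hfr2
        -- run the neighbor block with A's nested recursion at fuel g
        have hrec := IHf ((n, true) :: (ns.map (fun n => (n, false)) ++ rest)) hokr2 nbrs
          (PySem.Set.add st.1 n, st.2) a
          (pvC adj ((n, true) :: (ns.map (fun n => (n, false)) ++ rest)) st2.1)
          (fun m hm => pvGetD_sub_all adj n m hm)
          (by have hr : pvU adj (PySem.Set.add st.1 n, st.2).1 = pvU adj (PySem.Set.add st.1 n) := rfl
              omega)
          (by have hmul : pvU adj st.1 * (pvD adj + 2)
                  = pvU adj (PySem.Set.add st.1 n) * (pvD adj + 2) + (pvD adj + 2) := by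
                rw [← hU]; ring
              have hr : pvU adj (PySem.Set.add st.1 n, st.2).1 = pvU adj (PySem.Set.add st.1 n) := rfl
              unfold pvC at hcB ⊢
              simp only [List.length_append, List.length_map, List.length_cons] at hcB ⊢
              omega)
          (by rw [← hst2])
        rw [hrec, ← hst2]
        have hmono : ∀ x ∈ PySem.Set.add st.1 n, x ∈ st2.1 :=
          fun x hx => pvFoldA_mono _ g (pvDfsA_mono _ g) nbrs _ x hx
        have hU2 : pvU adj st2.1 ≤ pvU adj (PySem.Set.add st.1 n) :=
          pvU_mono adj _ _ hmono
        have hexit : pvRunB (PySem.Dict.mk adj) (pvC adj ((n, true) :: (ns.map (fun n => (n, false)) ++ rest)) st2.1)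
              ((n, true) :: (ns.map (fun n => (n, false)) ++ rest)) st2
            = pvRunB (PySem.Dict.mk adj) (pvC adj (ns.map (fun n => (n, false)) ++ rest) st2.1)
              (ns.map (fun n => (n, false)) ++ rest) (st2.1, st2.2 ++ [n]) := by
          have h1 : pvC adj ((n, true) :: (ns.map (fun n => (n, false)) ++ rest)) st2.1
              = pvC adj (ns.map (fun n => (n, false)) ++ rest) st2.1 + 1 := by
            unfold pvC; simp; omega
          rw [h1]
          simp [pvRunB]
        rw [hexit]
        rw [hA]
        apply IHns (st2.1, st2.2 ++ [n]) _ fB' (fun m hm => hmem m (by simp [hm]))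
        · simp only
          omega
        · exact le_rfl
        · rw [hA] at hcB'
          exact hcB'

lemma pvAll_length (adj : List (Int × List Int)) :
    (pvAll adj).length = adj.length + pvD adj := by
  induction adj with
  | nil => simp [pvAll, pvD]
  | cons p rest ih =>
    simp only [pvAll, pvD, List.flatMap_cons, List.length_append, List.length_cons,
      List.map_cons, List.sum_cons] at *
    omega

lemma pvU_empty_le (adj : List (Int × List Int)) :
    pvU adj [] ≤ adj.length + pvD adj := by
  unfold pvU
  rw [List.toFinset_nil, Finset.sdiff_empty]
  calc (pvAll adj).toFinset.card ≤ (pvAll adj).length := List.toFinset_card_le _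
    _ = adj.length + pvD adj := pvAll_length adj

lemma pvKeys_sub_all (adj : List (Int × List Int)) (k : Int)
    (hk : k ∈ (PySem.Dict.mk adj).keys) : k ∈ pvAll adj := by
  have : k ∈ adj.map Prod.fst := by simpa [PySem.Dict.keys] using hk
  obtain ⟨p, hp, rfl⟩ := List.mem_map.mp this
  exact List.mem_flatMap.mpr ⟨p, hp, by simp⟩

-- ===== VERDICT (by name: the statement is the Claim_ definition above) =====
theorem get_finish_order_dfs_spec : Claim_equal_get_finish_order_dfs := by
  unfold Claim_equal_get_finish_order_dfs
  intro adj _ _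
  unfold Spec_get_finish_order_dfs get_finish_order_dfs get_finish_order_dfs_alt
  simp only
  set d := PySem.Dict.mk adj with hd
  set X := d.keys.foldl (fun st node => pvDfsA d (pvFuelA adj) node st) (PySem.Set.empty, []) with hX
  have hU0 := pvU_empty_le adj
  have hmul : pvU adj [] * (pvD adj + 2) ≤ (adj.length + pvD adj) * (pvD adj + 2) :=
    Nat.mul_le_mul_right _ hU0
  have hkeys : d.keys.length = adj.length := by simp [hd, PySem.Dict.keys]
  have hsim := pvSIM adj (pvFuelA adj) [] (by intro fr hfr; simp at hfr)
    d.keys (PySem.Set.empty, []) (pvFuelB adj) (pvC adj [] X.1)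
    (fun k hk => pvKeys_sub_all adj k (by rwa [← hd]))
    (by unfold pvFuelA; simp only [PySem.Set.empty]; omega)
    (by unfold pvC pvFuelB
        simp only [List.append_nil, List.length_map, hkeys, PySem.Set.empty]
        omega)
    (by rw [← hd, ← hX])
  rw [← hd, ← hX] at hsim
  rw [List.append_nil] at hsim
  rw [hsim, pvRunB_nil]
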